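-- pv_equiv track=rewrite | github.com/zalastopar/Poker_slots | model.py | preveri_ce_je_stevilka
-- ===== SOURCE A (Python) =====
-- def preveri_ce_je_stevilka(stevilka):
--     st_pik = 0
--     if len(stevilka) == 0:
--         return False
--     for el in stevilka:
--         if el == ' ':
--             return False
--         elif el in '1234567890':
--             pass
--         else:
--             if el == '.':
--                 if st_pik == 0:
--                     st_pik += 1
--                 else:
--                     return False
--             else:
--                 return False
--     return True
-- ===== SOURCE B (Python) =====
-- def preveri_ce_je_stevilka(stevilka):
--     rest = stevilka.lstrip('0123456789')
--     if rest.startswith('.'):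
--         rest = rest[1:].lstrip('0123456789')
--     return stevilka != '' and rest == ''
-- ===== Notes on version B (the rewrite author's own statement) =====
-- stated objective: simpler
-- what changed: Replaces A's per-character validating loop with a dot-count accumulator by a parser-style scan: strip the leading digit run, consume one optional dot, strip a second digit run, and accept iff the input was non-empty and nothing is left.
import Mathlib
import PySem

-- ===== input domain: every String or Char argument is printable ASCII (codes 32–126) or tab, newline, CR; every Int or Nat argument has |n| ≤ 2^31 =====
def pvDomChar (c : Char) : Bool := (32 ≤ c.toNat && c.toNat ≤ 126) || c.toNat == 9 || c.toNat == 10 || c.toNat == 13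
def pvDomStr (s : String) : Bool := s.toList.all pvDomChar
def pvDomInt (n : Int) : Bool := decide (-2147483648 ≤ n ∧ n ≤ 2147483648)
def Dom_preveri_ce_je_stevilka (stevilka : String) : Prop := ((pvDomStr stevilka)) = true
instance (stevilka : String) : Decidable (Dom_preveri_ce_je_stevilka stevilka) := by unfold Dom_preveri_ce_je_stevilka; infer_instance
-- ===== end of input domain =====

-- B replaces A's per-character validating loop with a dot counter by a parser-style
-- scan: strip a leading digit run, consume one optional dot, strip a second digit run,
-- and accept iff the input was non-empty and nothing is left; same cost, simpler.

-- ===== PORT A =====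
-- the for-loop of A: early returns become Bool results, st_pik is the accumulator
def pvLoopA : List Char → Nat → Bool
  | [], _ => true
  | c :: t, st_pik =>
    if c = ' ' then false
    else if ("1234567890".toList.contains c) then pvLoopA t st_pik
    else if c = '.' then
      if st_pik = 0 then pvLoopA t (st_pik + 1) else false
    else false

def preveri_ce_je_stevilka (stevilka : String) : Bool :=
  if stevilka.toList.length = 0 then false
  else pvLoopA stevilka.toList 0

-- ===== PORT B =====
-- hand port of s.lstrip('0123456789') (no PySem primitive takes a char set for lstrip):
-- drop leading characters of the digit set — exact
def pvDig (c : Char) : Bool := "0123456789".toList.contains c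
def pvLstripDigits (l : List Char) : List Char := l.dropWhile pvDig

def preveri_ce_je_stevilka_alt (stevilka : String) : Bool :=
  let rest := pvLstripDigits stevilka.toList
  let rest := if PySem.Chars.startswith rest ['.']
              then pvLstripDigits (PySem.List.slice rest (some 1) none)
              else rest
  decide (stevilka.toList ≠ []) && decide (rest = [])

-- ===== PRECONDITION & SPEC =====
def Spec_preveri_ce_je_stevilka (stevilka : String) (out : Bool) : Prop := out = preveri_ce_je_stevilka_alt stevilka
instance (stevilka : String) (out : Bool) : Decidable (Spec_preveri_ce_je_stevilka stevilka out) := by unfold Spec_preveri_ce_je_stevilka; infer_instance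

-- ===== CLAIM (what is proved, stated in full; the proofs are below) =====
def Claim_equal_preveri_ce_je_stevilka : Prop := ∀ (stevilka : String), Dom_preveri_ce_je_stevilka stevilka → Spec_preveri_ce_je_stevilka stevilka (preveri_ce_je_stevilka stevilka)

-- ===== LEMMAS AND PROOFS =====

-- A's loop, for dot-count accumulator k ≤ 1, equals "total dots stay ≤ 1 and every char is a digit or dot"
theorem pvLoopA_eq (l : List Char) (k : Nat) (hk : k ≤ 1) :
    pvLoopA l k = ((l.count '.' + k ≤ 1 : Bool) && l.all (fun c => "1234567890.".toList.contains c)) := by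
  induction l generalizing k with
  | nil => simpa [pvLoopA] using hk
  | cons c t ih =>
    by_cases hs : c = ' '
    · subst hs; simp [pvLoopA]
    · by_cases hd : ("1234567890".toList.contains c) = true
      · rcases (by simpa using hd : c = '1' ∨ c = '2' ∨ c = '3' ∨ c = '4' ∨ c = '5' ∨
              c = '6' ∨ c = '7' ∨ c = '8' ∨ c = '9' ∨ c = '0') with h|h|h|h|h|h|h|h|h|h <;>
          subst h <;> simp [pvLoopA, ih k hk, List.count_cons]
      · by_cases hp : c = '.'
        · subst hp
          rcases Nat.lt_or_ge 0 k with hkpos | hk0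
          · have hk1 : k = 1 := by omega
            subst hk1
            simp [pvLoopA, List.count_cons]
          · have hk0' : k = 0 := by omega
            subst hk0'
            simp [pvLoopA, ih 1 (by omega), List.count_cons]
        · obtain ⟨h1, h2, h3, h4, h5, h6, h7, h8, h9, h0⟩ :
              c ≠ '1' ∧ c ≠ '2' ∧ c ≠ '3' ∧ c ≠ '4' ∧ c ≠ '5' ∧
              c ≠ '6' ∧ c ≠ '7' ∧ c ≠ '8' ∧ c ≠ '9' ∧ c ≠ '0' := by
            simpa using hd
          simp [pvLoopA, hs, hp, h1, h2, h3, h4, h5, h6, h7, h8, h9, h0]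

-- A's alphabet '1234567890.' is B's digit set plus the dot
theorem pvDigitOrDot (c : Char) :
    ("1234567890.".toList.contains c) = (pvDig c || c == '.') := by
  by_cases hp : c = '.'
  · subst hp; decide
  · by_cases hd : pvDig c = true
    · rcases (by simpa [pvDig] using hd : c = '0' ∨ c = '1' ∨ c = '2' ∨ c = '3' ∨ c = '4' ∨
          c = '5' ∨ c = '6' ∨ c = '7' ∨ c = '8' ∨ c = '9') with h|h|h|h|h|h|h|h|h|h <;>
        subst h <;> decide
    · obtain ⟨h0, h1, h2, h3, h4, h5, h6, h7, h8, h9⟩ :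
          c ≠ '0' ∧ c ≠ '1' ∧ c ≠ '2' ∧ c ≠ '3' ∧ c ≠ '4' ∧
          c ≠ '5' ∧ c ≠ '6' ∧ c ≠ '7' ∧ c ≠ '8' ∧ c ≠ '9' := by simpa [pvDig] using hd
      simp only [List.contains_cons, List.contains_nil,
                 Bool.eq_false_iff.mpr hd, Bool.false_or, Bool.or_false]
      simp [h0, h1, h2, h3, h4, h5, h6, h7, h8, h9, hp]

theorem pvDig_ne_dot {c : Char} (h : pvDig c = true) : (c == '.') = false := by
  rcases (by simpa [pvDig] using h : c = '0' ∨ c = '1' ∨ c = '2' ∨ c = '3' ∨ c = '4' ∨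
      c = '5' ∨ c = '6' ∨ c = '7' ∨ c = '8' ∨ c = '9') with h|h|h|h|h|h|h|h|h|h <;>
    subst h <;> decide

-- a digit run (empty leftover after one strip) is exactly "no dot and all chars digit-or-dot"
theorem pvAllDigit_iff (t : List Char) :
    decide (pvLstripDigits t = []) =
      ((t.count '.' = 0 : Bool) && t.all (fun c => "1234567890.".toList.contains c)) := by
  induction t with
  | nil => simp [pvLstripDigits]
  | cons c t ih =>
    cases hd : pvDig c with
    | true =>
      have hcp := pvDig_ne_dot hd
      simp only [pvLstripDigits, List.dropWhile_cons, hd, if_true, List.count_cons,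
                 List.all_cons, pvDigitOrDot, hcp, Bool.true_or, Bool.true_and,
                 if_false, Bool.false_eq_true, Nat.add_zero] at *
      exact ih
    | false =>
      cases hp : (c == '.') with
      | true =>
        have hc : c = '.' := by simpa using hp
        subst hc
        simp [pvLstripDigits, List.dropWhile_cons, pvDig, List.count_cons]
      | false =>
        have hcc : ("1234567890.".toList.contains c) = false := by
          rw [pvDigitOrDot, hd, hp]; rfl
        have h1 : pvLstripDigits (c :: t) = c :: t := by
          simp [pvLstripDigits, List.dropWhile_cons, hd]
        rw [h1]
        simp only [List.all_cons, hcc, Bool.false_and, Bool.and_false]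
        simp

-- B's leftover test characterised: empty leftover ↔ at most one dot and only digits/dot
theorem pvRest_eq (l : List Char) :
    (decide ((if PySem.Chars.startswith (pvLstripDigits l) ['.']
      then pvLstripDigits (PySem.List.slice (pvLstripDigits l) (some 1) none)
      else pvLstripDigits l) = [])) =
    ((l.count '.' ≤ 1 : Bool) && l.all (fun c => "1234567890.".toList.contains c)) := by
  induction l with
  | nil => simp [pvLstripDigits, PySem.Chars.startswith]
  | cons c t ih =>
    cases hd : pvDig c with
    | true =>
      have hcp := pvDig_ne_dot hd
      have h1 : pvLstripDigits (c :: t) = pvLstripDigits t := by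
        simp [pvLstripDigits, List.dropWhile_cons, hd]
      rw [h1]
      simp only [List.count_cons, List.all_cons, pvDigitOrDot, hd, hcp, Bool.true_or,
                 Bool.true_and, if_false, Bool.false_eq_true, Nat.add_zero] at *
      exact ih
    | false =>
      cases hp : (c == '.') with
      | true =>
        have hc : c = '.' := by simpa using hp
        subst hc
        have h1 : pvLstripDigits ('.' :: t) = '.' :: t := by
          simp [pvLstripDigits, List.dropWhile_cons, hd]
        rw [h1]
        have hsw : PySem.Chars.startswith ('.' :: t) ['.'] = true := by
          simp [PySem.Chars.startswith, List.isPrefixOf]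
        have hslice : PySem.List.slice ('.' :: t) (some 1) none = t := by
          simp [PySem.List.slice_from]
        simp only [hsw, if_true, hslice, pvAllDigit_iff]
        have hf : ("1234567890.".toList.contains '.') = true := by decide
        have hcnt : List.count '.' ('.' :: t) = List.count '.' t + 1 := by
          simp [List.count_cons]
        have hall : ('.' :: t).all (fun c => "1234567890.".toList.contains c)
            = t.all (fun c => "1234567890.".toList.contains c) := by
          simp [List.all_cons, hf]
        have hle : decide (List.count '.' t + 1 ≤ 1) = decide (List.count '.' t = 0) :=
          decide_eq_decide.mpr (by omega)
        rw [hcnt, hall, hle]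
      | false =>
        have hcc : ("1234567890.".toList.contains c) = false := by
          rw [pvDigitOrDot, hd, hp]; rfl
        have h1 : pvLstripDigits (c :: t) = c :: t := by
          simp [pvLstripDigits, List.dropWhile_cons, hd]
        rw [h1]
        have hpc : ('.' == c) = false := by
          cases hc : ('.' == c) with
          | false => rfl
          | true =>
            have hce : '.' = c := by simpa using hc
            rw [← hce] at hp
            simp at hp
        have hsw : PySem.Chars.startswith (c :: t) ['.'] = false := by
          simp [PySem.Chars.startswith, List.isPrefixOf, hpc]
        simp only [hsw, if_false, Bool.false_eq_true, List.all_cons, hcc,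
                   Bool.false_and, Bool.and_false]
        simp

-- ===== VERDICT (by name: the statement is the Claim_ definition above) =====
theorem preveri_ce_je_stevilka_spec : Claim_equal_preveri_ce_je_stevilka := by
  intro s _
  unfold Spec_preveri_ce_je_stevilka preveri_ce_je_stevilka preveri_ce_je_stevilka_alt
  cases h : s.toList with
  | nil => simp [h, pvLstripDigits, PySem.Chars.startswith]
  | cons c t =>
    simp only [List.length_cons, pvRest_eq, pvLoopA_eq (c :: t) 0 (by omega),
               Nat.add_zero]
    simp
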